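-- pv_equiv track=rewrite | github.com/Sophiescn/Slitherlink | fct_menu.py | dictionnaire_grilles
-- ===== SOURCE A (Python) =====
-- def dictionnaire_grilles(grilles):
--     """
--     la fonction crée deux dictionaires contenant trois grilles chacun.
--
--     Parameters
--     ----------
--     grilles : dictionaire
--         contient les grilles du jeu.
--
--     Returns
--     -------
--     grilles1 : dictionaire
--         contient trois des grilles du jeu.
--     grilles2 : dictionaire
--         contient trois des grilles du jeu.
--     """
--     cmpt = 1
--     grilles1 = {}
--     grilles2 = {}
--     for grille in grilles:
--         if cmpt <= 3:
--             grilles1[grille] = grilles[grille]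
--         else:
--             grilles2[grille] = grilles[grille]
--         cmpt += 1
--     return grilles1, grilles2
-- ===== SOURCE B (Python) =====
-- def dictionnaire_grilles(grilles):
--     items = list(grilles.items())
--     return dict(items[:3]), dict(items[3:])
-- ===== Notes on version B (the rewrite author's own statement) =====
-- stated objective: simpler
-- what changed: Replaces the counter-driven loop with a per-element branch by materializing the items once and splitting them with slices items[:3]/items[3:], rebuilding the two dicts directly.
import Mathlib
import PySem

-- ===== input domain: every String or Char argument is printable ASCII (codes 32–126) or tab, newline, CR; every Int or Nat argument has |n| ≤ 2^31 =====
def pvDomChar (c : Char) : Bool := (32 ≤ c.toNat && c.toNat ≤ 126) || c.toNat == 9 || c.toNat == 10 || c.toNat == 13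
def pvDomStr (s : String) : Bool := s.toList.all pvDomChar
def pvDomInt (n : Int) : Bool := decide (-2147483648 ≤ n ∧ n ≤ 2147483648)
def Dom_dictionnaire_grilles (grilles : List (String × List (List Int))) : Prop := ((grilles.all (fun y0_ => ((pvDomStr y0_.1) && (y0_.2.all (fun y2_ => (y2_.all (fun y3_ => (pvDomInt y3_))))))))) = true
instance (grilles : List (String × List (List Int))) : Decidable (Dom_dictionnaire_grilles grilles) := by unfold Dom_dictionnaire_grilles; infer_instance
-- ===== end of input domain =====

-- B replaces A's counter-driven loop with a one-shot slice split of the items list; return-value equivalence proved on association lists with distinct keys (the lists that represent a Python dict).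


-- ===== PORT A =====
-- cmpt = 1; grilles1 = {}; grilles2 = {};
-- for grille in grilles: lookup grilles[grille]; insert into grilles1 while cmpt <= 3, else grilles2; cmpt += 1
def dictionnaire_grilles (grilles : List (String × List (List Int))) : (List (String × List (List Int))) × (List (String × List (List Int))) :=
  let d := PySem.Dict.mk grilles
  let r := grilles.foldl
    (fun (st : Int × PySem.Dict String (List (List Int)) × PySem.Dict String (List (List Int))) kv =>
      if st.1 ≤ 3 then (st.1 + 1, st.2.1.insert kv.1 (d.getD kv.1 []), st.2.2)
      else (st.1 + 1, st.2.1, st.2.2.insert kv.1 (d.getD kv.1 [])))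
    (1, PySem.Dict.empty, PySem.Dict.empty)
  (r.2.1.items, r.2.2.items)

-- ===== PORT B =====
-- items = list(grilles.items()); return dict(items[:3]), dict(items[3:])
def dictionnaire_grilles_alt (grilles : List (String × List (List Int))) : (List (String × List (List Int))) × (List (String × List (List Int))) :=
  let items := grilles
  ((PySem.Dict.ofList (PySem.List.slice items none (some 3))).items,
   (PySem.Dict.ofList (PySem.List.slice items (some 3) none)).items)

-- ===== PRECONDITION & SPEC =====
-- Pre_ excludes association lists with duplicate keys, which do not represent any Python dict (A's argument is a dict, whose keys are necessarily distinct).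
def Pre_dictionnaire_grilles (grilles : List (String × List (List Int))) : Prop := (grilles.map Prod.fst).Nodup
instance (grilles : List (String × List (List Int))) : Decidable (Pre_dictionnaire_grilles grilles) := by unfold Pre_dictionnaire_grilles; infer_instance
def pvWitness_dictionnaire_grilles : (List (String × List (List Int))) := [("a", [[1]]), ("b", []), ("c", [[2, 3]]), ("d", [[0]])]

def Spec_dictionnaire_grilles (grilles : List (String × List (List Int))) (out : (List (String × List (List Int))) × (List (String × List (List Int)))) : Prop := out = dictionnaire_grilles_alt grilles
instance (grilles : List (String × List (List Int))) (out : (List (String × List (List Int))) × (List (String × List (List Int)))) : Decidable (Spec_dictionnaire_grilles grilles out) := by unfold Spec_dictionnaire_grilles; infer_instance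

-- ===== CLAIM (what is proved, stated in full; the proofs are below) =====
def Claim_equal_dictionnaire_grilles : Prop := ∀ (grilles : List (String × List (List Int))), Dom_dictionnaire_grilles grilles → Pre_dictionnaire_grilles grilles → Spec_dictionnaire_grilles grilles (dictionnaire_grilles grilles)

-- ===== LEMMAS AND PROOFS =====

-- Under distinct keys, looking a key of the list up in the dict returns its own value.
lemma lookup_self (grilles : List (String × List (List Int)))
    (hnd : (grilles.map Prod.fst).Nodup) {k : String} {v : List (List Int)}
    (hmem : (k, v) ∈ grilles) :
    (PySem.Dict.mk grilles).getD k [] = v := by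
  apply PySem.Dict.getD_of_mem_items (d := PySem.Dict.mk grilles) hmem
  simpa [PySem.Dict.keys_mk] using hnd

-- The counter loop from counter value c splits l at index (4 - c).toNat, appending to each dict.
lemma foldA {κ ν : Type} [BEq κ] [LawfulBEq κ] (l : List (κ × ν)) (c : Int) (hc : 1 ≤ c)
    (d1 d2 : PySem.Dict κ ν)
    (h1 : ∀ p ∈ l, d1.contains p.1 = false) (h2 : ∀ p ∈ l, d2.contains p.1 = false)
    (hl : (l.map Prod.fst).Nodup) :
    l.foldl (fun (st : Int × PySem.Dict κ ν × PySem.Dict κ ν) kv =>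
        if st.1 ≤ 3 then (st.1 + 1, st.2.1.insert kv.1 kv.2, st.2.2)
        else (st.1 + 1, st.2.1, st.2.2.insert kv.1 kv.2)) (c, d1, d2)
    = (c + l.length,
       PySem.Dict.mk (d1.items ++ l.take (4 - c).toNat),
       PySem.Dict.mk (d2.items ++ l.drop (4 - c).toNat)) := by
  induction l generalizing c d1 d2 with
  | nil => simp
  | cons kv t ih =>
    obtain ⟨k, v⟩ := kv
    simp only [List.map_cons, List.nodup_cons] at hl
    obtain ⟨hknot, hlt⟩ := hl
    by_cases hcle : c ≤ 3
    · have hstep : ((c, d1, d2) : Int × PySem.Dict κ ν × PySem.Dict κ ν).1 ≤ 3 := hcle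
      rw [List.foldl_cons]
      simp only [if_pos hcle]
      rw [ih (c + 1) (by omega) (d1.insert k v) d2
        (by
          intro p hp
          rw [PySem.Dict.contains_insert]
          have hpk : p.1 ≠ k := by
            intro h; exact hknot (h ▸ (List.mem_map.mpr ⟨p, hp, rfl⟩))
          simp [hpk, h1 p (List.mem_cons_of_mem _ hp)])
        (fun p hp => h2 p (List.mem_cons_of_mem _ hp)) hlt]
      have hn : (4 - c).toNat = (4 - (c + 1)).toNat + 1 := by omega
      rw [PySem.Dict.items_insert_of_not_contains d1 v (h1 (k, v) List.mem_cons_self)]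
      simp [hn, List.append_assoc]
      omega
    · rw [List.foldl_cons]
      simp only [if_neg hcle]
      rw [ih (c + 1) (by omega) d1 (d2.insert k v)
        (fun p hp => h1 p (List.mem_cons_of_mem _ hp))
        (by
          intro p hp
          rw [PySem.Dict.contains_insert]
          have hpk : p.1 ≠ k := by
            intro h; exact hknot (h ▸ (List.mem_map.mpr ⟨p, hp, rfl⟩))
          simp [hpk, h2 p (List.mem_cons_of_mem _ hp)]) hlt]
      have hn0 : (4 - c).toNat = 0 := by omega
      have hn0' : (4 - (c + 1)).toNat = 0 := by omega
      rw [PySem.Dict.items_insert_of_not_contains d2 v (h2 (k, v) List.mem_cons_self)]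
      simp [hn0, hn0']
      ring

-- dict(list with distinct keys) keeps the list as its items.
lemma items_ofList_nodup {κ ν : Type} [BEq κ] [LawfulBEq κ] (l : List (κ × ν))
    (hl : (l.map Prod.fst).Nodup) :
    (PySem.Dict.ofList l : PySem.Dict κ ν).items = l := by
  have h := PySem.Dict.items_foldl_insert_fresh l Prod.fst Prod.snd PySem.Dict.empty
    (by intro a _; simp [PySem.Dict.contains_empty]) hl
  simpa [PySem.Dict.items] using h

-- ===== VERDICT (by name: the statement is the Claim_ definition above) =====
theorem dictionnaire_grilles_spec : Claim_equal_dictionnaire_grilles := by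
  intro grilles _ hpre
  unfold Spec_dictionnaire_grilles dictionnaire_grilles dictionnaire_grilles_alt
  have hcongr := PySem.List.foldl_congr_mem grilles
    (fun (st : Int × PySem.Dict String (List (List Int)) × PySem.Dict String (List (List Int))) kv =>
      if st.1 ≤ 3 then (st.1 + 1, st.2.1.insert kv.1 ((PySem.Dict.mk grilles).getD kv.1 []), st.2.2)
      else (st.1 + 1, st.2.1, st.2.2.insert kv.1 ((PySem.Dict.mk grilles).getD kv.1 [])))
    (fun (st : Int × PySem.Dict String (List (List Int)) × PySem.Dict String (List (List Int))) kv =>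
      if st.1 ≤ 3 then (st.1 + 1, st.2.1.insert kv.1 kv.2, st.2.2)
      else (st.1 + 1, st.2.1, st.2.2.insert kv.1 kv.2))
    (1, PySem.Dict.empty, PySem.Dict.empty)
    (by
      intro acc x hx
      obtain ⟨k, v⟩ := x
      simp only [lookup_self grilles hpre hx])
  simp only [hcongr]
  rw [foldA grilles 1 (by norm_num) PySem.Dict.empty PySem.Dict.empty
    (by intro p _; simp [PySem.Dict.contains_empty])
    (by intro p _; simp [PySem.Dict.contains_empty]) hpre]
  have h3 : PySem.List.slice grilles none (some 3) = grilles.take 3 := by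
    simpa using PySem.List.slice_to_natCast grilles 3
  have h3' : PySem.List.slice grilles (some 3) none = grilles.drop 3 := by
    simpa using PySem.List.slice_from_natCast grilles 3
  rw [h3, h3',
    items_ofList_nodup _ (by simpa [List.map_take] using hpre.sublist ((List.take_sublist 3 grilles).map Prod.fst)),
    items_ofList_nodup _ (by simpa [List.map_drop] using hpre.sublist ((List.drop_sublist 3 grilles).map Prod.fst))]
  simp [PySem.Dict.empty]
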